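-- pv_equiv track=rewrite | github.com/luanshiyinyang/LCNotes | Problems/other-001/solve.py | solve
-- ===== SOURCE A (Python) =====
-- def solve(n: int, k: int, a: list):
--     accu = [a[-1]]
--     # 累加后缀和
--     for i in range(1, n):
--         accu.append(accu[i - 1] + a[-(i + 1)])
--     ans = accu[-1]  # 必有原始数组
--     accu.pop(-1)
--     accu.sort(reverse=True)  # 降序排列
--     ans += sum(accu[:(k - 1)])  # 原始数组加上最大的k-1个后缀和
--     return ans
-- ===== SOURCE B (Python) =====
-- def _top_sum(xs, m):
--     # sum of the m largest elements of xs, by three-way-partition quickselect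
--     if m <= 0 or not xs:
--         return 0
--     if m >= len(xs):
--         return sum(xs)
--     p = xs[len(xs) // 2]
--     big = [x for x in xs if x > p]
--     small = [x for x in xs if x < p]
--     neq = len(xs) - len(big) - len(small)
--     if m <= len(big):
--         return _top_sum(big, m)
--     if m <= len(big) + neq:
--         return sum(big) + p * (m - len(big))
--     return sum(big) + p * neq + _top_sum(small, m - len(big) - neq)
--
--
-- def solve(n: int, k: int, a: list):
--     # suffix sums from the end: start with the last element, extend until n sums
--     sums = [a[-1]]
--     while len(sums) < n:
--         sums.append(sums[-1] + a[-len(sums) - 1])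
--     # total plus the k-1 largest proper suffix sums, selected without sorting
--     return sums[-1] + _top_sum(sums[:-1], k - 1)
-- ===== Notes on version B (the rewrite author's own statement) =====
-- stated objective: alternative
-- what changed: B grows the suffix-sum list with a length-driven while loop instead of A's indexed range loop, and replaces A's full descending sort plus slice by a three-way-partition quickselect that sums the k-1 largest suffix sums without sorting; Pre_ excludes only inputs where A raises IndexError (empty a or n > len(a)) and the out-of-domain corner k <= 0 in the region n >= 3, 3-n <= k, where A's negative slice accu[:k-1] wraps around (an artifact) while B's selection of a non-positive count is empty.
-- outside the precondition, e.g. on solve(3, 0, [1, 2, 3]): A returns 11, B returns 6; on solve(4, -1, [1, 2, 3, 4]): A returns 19, B returns 10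
import Mathlib
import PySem

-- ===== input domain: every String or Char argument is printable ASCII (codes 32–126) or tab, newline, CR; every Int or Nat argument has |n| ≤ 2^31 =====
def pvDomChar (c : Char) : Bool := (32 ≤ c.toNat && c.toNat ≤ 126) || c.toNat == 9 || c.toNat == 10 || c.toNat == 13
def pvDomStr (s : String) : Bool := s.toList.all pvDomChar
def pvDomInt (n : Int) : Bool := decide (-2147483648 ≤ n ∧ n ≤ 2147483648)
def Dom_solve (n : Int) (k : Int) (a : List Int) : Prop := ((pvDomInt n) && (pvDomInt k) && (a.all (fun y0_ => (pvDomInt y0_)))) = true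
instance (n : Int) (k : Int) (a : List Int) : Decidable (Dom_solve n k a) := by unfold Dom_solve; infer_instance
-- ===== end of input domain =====

-- B builds the suffix sums in one pass and picks the k-1 largest by a quickselect-style
-- three-way partition instead of A's negative indexing plus full sort (objective: alternative).


-- ===== PORT A =====
def solve (n : Int) (k : Int) (a : List Int) : Int :=
  let accu := (PySem.List.pyRange 1 n 1).foldl
    (fun accu i => accu ++ [PySem.List.pyGetD accu (i - 1) 0 + PySem.List.pyGetD a (-(i + 1)) 0])
    [PySem.List.pyGetD a (-1) 0]
  let ans := PySem.List.pyGetD accu (-1) 0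
  let accu2 := ((PySem.List.pop? accu (-1)).map Prod.snd).getD []      -- accu.pop(-1)
  let accu3 := PySem.List.sorted accu2 (fun x => x) true               -- accu.sort(reverse=True)
  ans + (PySem.List.slice accu3 none (some (k - 1))).sum

-- ===== PORT B =====
-- sum of the m largest elements of xs, by three-way-partition quickselect (Source B's _top_sum)
def pvPart (p : Int) (xs : List Int) : List Int × List Int :=
  (xs.filter (fun x => p < x), xs.filter (fun x => x < p))

theorem pvPart_fst_lt (p : Int) (xs : List Int) (h : p ∈ xs) :
    (pvPart p xs).1.length < xs.length :=
  List.length_filter_lt_length_iff_exists.mpr ⟨p, h, by simp⟩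

theorem pvPart_snd_lt (p : Int) (xs : List Int) (h : p ∈ xs) :
    (pvPart p xs).2.length < xs.length :=
  List.length_filter_lt_length_iff_exists.mpr ⟨p, h, by simp⟩

def topSum (xs : List Int) (m : Int) : Int :=
  if h0 : m ≤ 0 ∨ xs = [] then 0
  else if (xs.length : Int) ≤ m then xs.sum
  else
    let p := PySem.List.pyGetD xs ((xs.length : Int) / 2) 0
    let big := (pvPart p xs).1
    let small := (pvPart p xs).2
    let neq : Int := (xs.length : Int) - big.length - small.length
    if m ≤ big.length then topSum big m
    else if m ≤ (big.length : Int) + neq then big.sum + p * (m - big.length)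
    else big.sum + p * neq + topSum small (m - big.length - neq)
termination_by xs.length
decreasing_by
  · exact pvPart_fst_lt p xs (PySem.List.pyGetD_mem xs 0 (by
      have : xs ≠ [] := fun he => h0 (Or.inr he)
      have : 0 < xs.length := List.length_pos_iff.mpr this
      constructor <;> omega))
  · exact pvPart_snd_lt p xs (PySem.List.pyGetD_mem xs 0 (by
      have : xs ≠ [] := fun he => h0 (Or.inr he)
      have : 0 < xs.length := List.length_pos_iff.mpr this
      constructor <;> omega))

-- Source B's while loop: extend sums while len(sums) < n
def buildSums (n : Int) (a : List Int) (sums : List Int) : List Int :=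
  if h : (sums.length : Int) < n then
    buildSums n a (sums ++ [PySem.List.pyGetD sums (-1) 0 + PySem.List.pyGetD a (-(sums.length : Int) - 1) 0])
  else sums
termination_by (n - sums.length).toNat
decreasing_by simp only [List.length_append, List.length_cons, List.length_nil]; omega

def solve_alt (n : Int) (k : Int) (a : List Int) : Int :=
  let sums := buildSums n a [PySem.List.pyGetD a (-1) 0]
  PySem.List.pyGetD sums (-1) 0 + topSum (PySem.List.slice sums none (some (-1))) (k - 1)

-- ===== PRECONDITION & SPEC =====
-- Pre_ excludes the inputs on which A raises IndexError (a = [] or n > len(a)) and the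
-- out-of-natural-domain count k ≤ 0 in the region n + k ≥ 3 where it changes the result:
-- there A's negative slice accu[:k-1] wraps around and adds the n+k-2 largest suffix
-- sums (an artifact of Python slicing) while B selects a non-positive count, i.e. nothing.
def Pre_solve (n : Int) (k : Int) (a : List Int) : Prop :=
  a ≠ [] ∧ n ≤ a.length ∧ ¬(k ≤ 0 ∧ 3 ≤ n ∧ 3 - n ≤ k)
instance (n : Int) (k : Int) (a : List Int) : Decidable (Pre_solve n k a) := by unfold Pre_solve; infer_instance

def pvWitness_solve : Int × Int × List Int := (3, 2, [1, -2, 3])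

def Spec_solve (n : Int) (k : Int) (a : List Int) (out : Int) : Prop := out = solve_alt n k a
instance (n : Int) (k : Int) (a : List Int) (out : Int) : Decidable (Spec_solve n k a out) := by unfold Spec_solve; infer_instance

-- ===== CLAIM (what is proved, stated in full; the proofs are below) =====
def Claim_equal_solve : Prop := ∀ (n : Int) (k : Int) (a : List Int), Dom_solve n k a → Pre_solve n k a → Spec_solve n k a (solve n k a)

-- ===== LEMMAS AND PROOFS =====

-- prefix-sum list: pfx [x0, x1, ...] = [x0, x0+x1, ...]
def pfx : List Int → List Int
  | [] => []
  | x :: R => x :: (pfx R).map (fun t => x + t)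

theorem pfx_length (R : List Int) : (pfx R).length = R.length := by
  induction R with
  | nil => rfl
  | cons x R ih => simp [pfx, ih]

theorem pfx_getElem (R : List Int) (i : Nat) (h : i < R.length) :
    (pfx R)[i]'(by rw [pfx_length]; exact h) = (R.take (i + 1)).sum := by
  induction R generalizing i with
  | nil => simp at h
  | cons x R ih =>
    cases i with
    | zero => simp [pfx]
    | succ j =>
      have hj : j < R.length := by simpa using h
      simp only [pfx, List.getElem_cons_succ, List.getElem_map, ih j hj,
        List.take_succ_cons, List.sum_cons]

theorem pfx_snoc (R : List Int) (x : Int) : pfx (R ++ [x]) = pfx R ++ [R.sum + x] := by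
  induction R with
  | nil => simp [pfx]
  | cons y R ih => simp [pfx, ih, add_assoc]

theorem R_get (a : List Int) (N : Nat) (hN : N ≤ a.length) (t : Nat) (ht : t < N) :
    ((a.drop (a.length - N)).reverse)[t]'(by simp; omega) = a[a.length - (t + 1)]'(by omega) := by
  rw [List.getElem_reverse, List.getElem_drop]
  congr 1
  simp
  omega

theorem accu_inv (a : List Int) (N : Nat) (hN1 : 1 ≤ N) (hNle : N ≤ a.length) :
    ∀ t : Nat, 1 ≤ t → t ≤ N →
      (PySem.List.pyRange 1 (t : Int) 1).foldl
          (fun accu i => accu ++ [PySem.List.pyGetD accu (i - 1) 0 + PySem.List.pyGetD a (-(i + 1)) 0])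
          [PySem.List.pyGetD a (-1) 0]
        = pfx (((a.drop (a.length - N)).reverse).take t) := by
  have hRlen : ((a.drop (a.length - N)).reverse).length = N := by
    simp; omega
  intro t
  induction t with
  | zero => intro h; exact absurd h (by omega)
  | succ t ih =>
    intro _ htN
    by_cases ht0 : t = 0
    · subst ht0
      have ha : a ≠ [] := by
        intro he; rw [he] at hNle; simp at hNle; omega
      have h0 : (0 : Nat) < ((a.drop (a.length - N)).reverse).length := by omega
      have hrange : PySem.List.pyRange 1 ((0 + 1 : Nat) : Int) 1 = [] := by
        norm_num [PySem.List.pyRange_one_eq_nil]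
      rw [hrange]
      simp only [List.foldl_nil]
      have htake : ((a.drop (a.length - N)).reverse).take (0 + 1)
          = [((a.drop (a.length - N)).reverse)[0]'h0] := by
        rw [List.take_add_one]
        simp [List.getElem?_eq_getElem h0]
      rw [htake]
      rw [PySem.List.pyGetD_neg_one a 0 ha]
      rw [R_get a N hNle 0 (by omega)]
      simp [pfx, List.getLast_eq_getElem]
    · have ht1 : 1 ≤ t := by omega
      have hlt : t < ((a.drop (a.length - N)).reverse).length := by omega
      have hstep : PySem.List.pyRange 1 ((t + 1 : Nat) : Int) 1
          = PySem.List.pyRange 1 (t : Int) 1 ++ [(t : Int)] := by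
        push_cast
        exact PySem.List.pyRange_one_succ_right (by exact_mod_cast ht1)
      rw [hstep, List.foldl_append, ih ht1 (by omega)]
      simp only [List.foldl_cons, List.foldl_nil]
      have hlenp : (pfx (((a.drop (a.length - N)).reverse).take t)).length = t := by
        rw [pfx_length, List.length_take]; omega
      have h1 : PySem.List.pyGetD (pfx (((a.drop (a.length - N)).reverse).take t)) ((t : Int) - 1) 0
          = (((a.drop (a.length - N)).reverse).take t).sum := by
        have hc : ((t : Int) - 1) = ((t - 1 : Nat) : Int) := by omega
        rw [hc, PySem.List.pyGetD_natCast,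
          List.getD_eq_getElem _ _ (by rw [hlenp]; omega),
          pfx_getElem _ _ (by rw [List.length_take]; omega)]
        have he : t - 1 + 1 = t := by omega
        rw [he, List.take_take, min_self]
      have h2 : PySem.List.pyGetD a (-((t : Int) + 1)) 0
          = ((a.drop (a.length - N)).reverse)[t]'hlt := by
        have hc : (-((t : Int) + 1)) = -(((t + 1 : Nat) : Int)) := by push_cast; ring
        rw [hc, PySem.List.pyGetD_neg_natCast a (t + 1) 0 (by omega) (by omega)]
        rw [R_get a N hNle t (by omega)]
      rw [h1, h2]
      have htake : ((a.drop (a.length - N)).reverse).take (t + 1)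
          = ((a.drop (a.length - N)).reverse).take t ++ [((a.drop (a.length - N)).reverse)[t]'hlt] := by
        rw [List.take_add_one]
        simp [List.getElem?_eq_getElem hlt]
      rw [htake, pfx_snoc]


-- B's while loop, from an already-built prefix of the suffix sums, completes them
theorem buildSums_from (a : List Int) (n : Int) (N : Nat) (hN1 : 1 ≤ N)
    (hNn : (N : Int) = max n 1) (hNle : N ≤ a.length) :
    ∀ (d t : Nat), N - t ≤ d → 1 ≤ t → t ≤ N →
      buildSums n a (pfx (((a.drop (a.length - N)).reverse).take t))
        = pfx ((a.drop (a.length - N)).reverse) := by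
  have hRlen : ((a.drop (a.length - N)).reverse).length = N := by simp; omega
  have hstop : buildSums n a (pfx ((a.drop (a.length - N)).reverse))
      = pfx ((a.drop (a.length - N)).reverse) := by
    rw [buildSums, dif_neg]
    rw [pfx_length, hRlen]
    have : n ≤ max n 1 := le_max_left n 1
    omega
  intro d
  induction d with
  | zero =>
    intro t hd ht1 htN
    have ht : t = N := by omega
    subst ht
    rw [List.take_of_length_le (by rw [hRlen]), hstop]
  | succ d ih =>
    intro t hd ht1 htN
    by_cases htn : t = N
    · subst htn
      rw [List.take_of_length_le (by rw [hRlen]), hstop]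
    · have htlt : t < N := by omega
      have hlt : t < ((a.drop (a.length - N)).reverse).length := by omega
      have hlenp : (pfx (((a.drop (a.length - N)).reverse).take t)).length = t := by
        rw [pfx_length, List.length_take]; omega
      have hne : pfx (((a.drop (a.length - N)).reverse).take t) ≠ [] := by
        intro h; rw [h] at hlenp; simp at hlenp; omega
      have hnN2 : (N : Int) = n := by
        have h2 : (2 : Int) ≤ N := by exact_mod_cast (by omega : 2 ≤ N)
        rcases max_cases n 1 with ⟨he, _⟩ | ⟨he, _⟩ <;> omega
      rw [buildSums, dif_pos (by rw [hlenp]; omega)]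
      have hlast : PySem.List.pyGetD (pfx (((a.drop (a.length - N)).reverse).take t)) (-1) 0
          = ((((a.drop (a.length - N)).reverse)).take t).sum := by
        rw [PySem.List.pyGetD_neg_one _ _ hne, List.getLast_eq_getElem]
        simp only [hlenp]
        rw [pfx_getElem _ _ (by rw [List.length_take]; omega)]
        have he : t - 1 + 1 = t := by omega
        rw [he, List.take_take, min_self]
      have hidx : PySem.List.pyGetD a
            (-((pfx (((a.drop (a.length - N)).reverse).take t)).length : Int) - 1) 0
          = ((a.drop (a.length - N)).reverse)[t]'hlt := by
        simp only [hlenp]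
        have hc : (-(t : Int) - 1) = -(((t + 1 : Nat) : Int)) := by push_cast; ring
        rw [hc, PySem.List.pyGetD_neg_natCast a (t + 1) 0 (by omega) (by omega)]
        rw [R_get a N hNle t (by omega)]
      rw [hlast, hidx]
      have htake : ((a.drop (a.length - N)).reverse).take (t + 1)
          = ((a.drop (a.length - N)).reverse).take t
            ++ [((a.drop (a.length - N)).reverse)[t]'hlt] := by
        rw [List.take_add_one]
        simp [List.getElem?_eq_getElem hlt]
      rw [← pfx_snoc, ← htake]
      exact ih (t + 1) (by omega) (by omega) (by omega)

theorem sortedRev_eq (xs ys : List Int) (hp : ys.Perm xs)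
    (hs : List.Pairwise (fun a b : Int => b ≤ a) ys) :
    PySem.List.sorted xs (fun x => x) true = ys := by
  have h1 := PySem.List.sorted_perm xs (fun x => x) true
  have h2 := PySem.List.sorted_pairwise_rev xs (fun x => x)
  exact List.eq_of_perm_of_sorted (fun a b _ _ hab hba => le_antisymm hba hab) h2 hs
    (h1.trans hp.symm)

theorem part_perm (p : Int) (xs : List Int) :
    xs.Perm (List.filter (fun x => decide (p < x)) xs ++
      (List.filter (fun x => decide (x = p)) xs ++ List.filter (fun x => decide (x < p)) xs)) := by
  induction xs with
  | nil => simp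
  | cons x xs ih =>
    rcases lt_trichotomy p x with h | h | h
    · have h1 : ¬ (x = p) := by omega
      have h2 : ¬ (x < p) := by omega
      simpa [List.filter_cons, h, h1, h2] using ih.cons x
    · have h1 : ¬ (p < x) := by omega
      have h2 : ¬ (x < p) := by omega
      have := (ih.cons x).trans
        (List.perm_middle (a := x)
          (l₁ := List.filter (fun x => decide (p < x)) xs)
          (l₂ := List.filter (fun x => decide (x = p)) xs ++
                 List.filter (fun x => decide (x < p)) xs)).symm
      simpa [List.filter_cons, h.symm, h1, h2] using this
    · have h1 : ¬ (p < x) := by omega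
      have h2 : ¬ (x = p) := by omega
      have hmid : (x :: (List.filter (fun x => decide (p < x)) xs ++
          (List.filter (fun x => decide (x = p)) xs ++ List.filter (fun x => decide (x < p)) xs))).Perm
          (List.filter (fun x => decide (p < x)) xs ++
            (List.filter (fun x => decide (x = p)) xs ++ x :: List.filter (fun x => decide (x < p)) xs)) := by
        have := (List.perm_middle (a := x)
          (l₁ := List.filter (fun x => decide (p < x)) xs ++
                 List.filter (fun x => decide (x = p)) xs)
          (l₂ := List.filter (fun x => decide (x < p)) xs)).symm
        simpa [List.append_assoc] using this
      simpa [List.filter_cons, h, h1, h2] using (ih.cons x).trans hmid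

theorem topSum_spec : ∀ (N : Nat) (xs : List Int), xs.length ≤ N → ∀ m : Int,
    topSum xs m = ((PySem.List.sorted xs (fun x => x) true).take m.toNat).sum := by
  intro N
  induction N with
  | zero =>
    intro xs h m
    have hx : xs = [] := by cases xs <;> simp_all
    subst hx
    rw [topSum]
    rw [(PySem.List.sorted_eq_nil_iff ([] : List Int) (fun x => x) true).mpr rfl]
    simp
  | succ N ih =>
    intro xs hlen m
    rw [topSum]
    by_cases h0 : m ≤ 0 ∨ xs = []
    · rw [dif_pos h0]
      rcases h0 with h | h
      · have hm0 : m.toNat = 0 := by omega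
        simp [hm0]
      · subst h
        rw [(PySem.List.sorted_eq_nil_iff ([] : List Int) (fun x => x) true).mpr rfl]
        simp
    · rw [dif_neg h0]
      push_neg at h0
      obtain ⟨hm, hne⟩ := h0
      have hm' : 0 < m := by omega
      have hxspos : 0 < xs.length := List.length_pos_iff.mpr hne
      by_cases hall : (xs.length : Int) ≤ m
      · rw [if_pos hall]
        rw [List.take_of_length_le (by rw [PySem.List.length_sorted]; omega)]
        exact ((PySem.List.sorted_perm xs _ true).sum_eq).symm
      · rw [if_neg hall]
        dsimp only [pvPart]
        set p := PySem.List.pyGetD xs ((xs.length : Int) / 2) 0 with hpdef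
        have hpmem : p ∈ xs := PySem.List.pyGetD_mem xs 0 (by constructor <;> omega)
        set B := List.filter (fun x => decide (p < x)) xs with hBdef
        set E := List.filter (fun x => decide (x = p)) xs with hEdef
        set S := List.filter (fun x => decide (x < p)) xs with hSdef
        have hperm : xs.Perm (B ++ (E ++ S)) := part_perm p xs
        have hE : E = List.replicate E.length p :=
          List.eq_replicate_of_mem (fun b hb => by simpa using (List.mem_filter.mp hb).2)
        have hpE : p ∈ E := by
          rw [hEdef]; exact List.mem_filter.mpr ⟨hpmem, by simp⟩
        have hEpos : 0 < E.length := List.length_pos_iff.mpr (fun he => by simp [he] at hpE)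
        have hcount : xs.length = B.length + E.length + S.length := by
          have := hperm.length_eq
          simp at this
          omega
        have hmemB : ∀ y ∈ PySem.List.sorted B (fun x => x) true, p < y := by
          intro y hy
          have : y ∈ B := (PySem.List.mem_sorted B (fun x => x) true y).mp hy
          simpa using (List.mem_filter.mp this).2
        have hmemS : ∀ y ∈ PySem.List.sorted S (fun x => x) true, y < p := by
          intro y hy
          have : y ∈ S := (PySem.List.mem_sorted S (fun x => x) true y).mp hy
          simpa using (List.mem_filter.mp this).2
        have hsort : PySem.List.sorted xs (fun x => x) true
            = PySem.List.sorted B (fun x => x) true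
              ++ (List.replicate E.length p ++ PySem.List.sorted S (fun x => x) true) := by
          apply sortedRev_eq
          · refine List.Perm.trans ?_ hperm.symm
            exact ((PySem.List.sorted_perm B _ true).append
              ((List.Perm.of_eq hE.symm).append (PySem.List.sorted_perm S _ true)))
          · rw [List.pairwise_append]
            refine ⟨PySem.List.sorted_pairwise_rev B (fun x => x), ?_, ?_⟩
            · rw [List.pairwise_append]
              refine ⟨List.pairwise_replicate.mpr (Or.inr le_rfl),
                PySem.List.sorted_pairwise_rev S (fun x => x), ?_⟩
              intro y hy z hz
              have hyp : y = p := List.eq_of_mem_replicate hy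
              have hzp : z < p := hmemS z hz
              omega
            · intro y hy z hz
              have hyp : p < y := hmemB y hy
              rcases List.mem_append.mp hz with hz | hz
              · have : z = p := List.eq_of_mem_replicate hz
                omega
              · have : z < p := hmemS z hz
                omega
        rw [hsort]
        have hlB : (PySem.List.sorted B (fun x => x) true).length = B.length :=
          PySem.List.length_sorted B (fun x => x) true
        have hsumB : (PySem.List.sorted B (fun x => x) true).sum = B.sum :=
          (PySem.List.sorted_perm B _ true).sum_eq
        by_cases hc1 : m ≤ (B.length : Int)
        · rw [if_pos hc1]
          rw [List.take_append]
          have hz : m.toNat - (PySem.List.sorted B (fun x => x) true).length = 0 := by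
            rw [hlB]; omega
          rw [hz]
          simp only [List.take_zero, List.append_nil]
          exact ih B (by omega) m
        · rw [if_neg hc1]
          have hsplit1 : m.toNat - (PySem.List.sorted B (fun x => x) true).length
              = m.toNat - B.length := by rw [hlB]
          have htB : (PySem.List.sorted B (fun x => x) true).take m.toNat
              = PySem.List.sorted B (fun x => x) true := by
            apply List.take_of_length_le
            rw [hlB]; omega
          rw [List.take_append, hsplit1, htB, List.take_append, List.take_replicate,
            List.sum_append, List.sum_append, hsumB, List.sum_replicate]
          by_cases hc2 : m ≤ (B.length : Int) + ((xs.length : Int) - (B.length : Int) - (S.length : Int))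
          · rw [if_pos hc2]
            have hz2 : m.toNat - B.length - (List.replicate E.length p).length = 0 := by
              simp only [List.length_replicate]; omega
            have hmin2 : min (m.toNat - B.length) E.length = m.toNat - B.length := by omega
            rw [hz2, hmin2]
            simp only [List.take_zero, List.sum_nil, add_zero]
            have hc : ((m.toNat - B.length : Nat) : Int) = m - B.length := by omega
            rw [nsmul_eq_mul, hc]
            ring
          · rw [if_neg hc2]
            have hminE : min (m.toNat - B.length) E.length = E.length := by omega
            have hz3 : m.toNat - B.length - (List.replicate E.length p).length
                = m.toNat - B.length - E.length := by simp
            rw [hminE, hz3]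
            have hidx : (m - (B.length : Int) - ((xs.length : Int) - (B.length : Int) - (S.length : Int))).toNat
                = m.toNat - B.length - E.length := by omega
            rw [ih S (by omega) (m - B.length - ((xs.length : Int) - (B.length : Int) - (S.length : Int))), hidx]
            rw [nsmul_eq_mul]
            have hcE : ((E.length : Nat) : Int) = (xs.length : Int) - (B.length : Int) - (S.length : Int) := by
              omega
            rw [hcE]
            ring

-- ===== VERDICT (by name: the statement is the Claim_ definition above) =====
theorem solve_spec : Claim_equal_solve := by
  intro n k a _ hpre
  obtain ⟨hane, hnle, hknice⟩ := hpre
  show solve n k a = solve_alt n k a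
  simp only [solve, solve_alt]
  have hlen1 : 0 < a.length := List.length_pos_iff.mpr hane
  have hm1 : (1 : Int) ≤ max n 1 := le_max_right n 1
  have hmle : max n 1 ≤ (a.length : Int) :=
    max_le hnle (by exact_mod_cast hlen1)
  set N : Nat := (max n 1).toNat with hNdef
  have hnN : (N : Int) = max n 1 := Int.toNat_of_nonneg (by omega)
  have hN1 : 1 ≤ N := by omega
  have hNle : N ≤ a.length := by
    have h : ((N : Nat) : Int) ≤ (a.length : Int) := by rw [hnN]; exact hmle
    exact_mod_cast h
  have hpyr : PySem.List.pyRange 1 n 1 = PySem.List.pyRange 1 ((N : Nat) : Int) 1 := by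
    rw [hnN]
    by_cases h : n ≤ 1
    · rw [max_eq_right h, PySem.List.pyRange_one_eq_nil (by omega),
        PySem.List.pyRange_one_eq_nil (by omega)]
    · rw [max_eq_left (by omega)]
  rw [hpyr]
  have hRlen : ((a.drop (a.length - N)).reverse).length = N := by
    simp; omega
  have hpfxlen : (pfx ((a.drop (a.length - N)).reverse)).length = N := by
    rw [pfx_length, hRlen]
  have hpfxne : pfx ((a.drop (a.length - N)).reverse) ≠ [] := by
    intro h; rw [h] at hpfxlen; simp at hpfxlen; omega
  have haccu := accu_inv a N hN1 hNle N hN1 le_rfl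
  rw [List.take_of_length_le (by rw [hRlen])] at haccu
  rw [haccu]
  -- B's seed [a[-1]] is the first suffix sum (accu_inv at t = 1)
  have hbase := accu_inv a N hN1 hNle 1 le_rfl hN1
  rw [show PySem.List.pyRange 1 ((1 : Nat) : Int) 1 = [] from by
    norm_num [PySem.List.pyRange_one_eq_nil]] at hbase
  simp only [List.foldl_nil] at hbase
  rw [hbase, buildSums_from a n N hN1 hnN hNle (N - 1) 1 (by omega) le_rfl hN1]
  have hans : PySem.List.pyGetD (pfx ((a.drop (a.length - N)).reverse)) (-1) 0
      = ((a.drop (a.length - N)).reverse).sum := by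
    rw [PySem.List.pyGetD_neg_one _ _ hpfxne, List.getLast_eq_getElem]
    simp only [hpfxlen]
    rw [pfx_getElem _ _ (by omega)]
    have he : N - 1 + 1 = ((a.drop (a.length - N)).reverse).length := by omega
    rw [he, List.take_length]
  rw [hans]
  have hpop : ((PySem.List.pop? (pfx ((a.drop (a.length - N)).reverse)) (-1)).map Prod.snd).getD []
      = (pfx ((a.drop (a.length - N)).reverse)).dropLast := by
    conv_lhs => rw [← List.dropLast_append_getLast hpfxne]
    rw [PySem.List.pop?_last]
    simp
  rw [hpop]
  rw [PySem.List.slice_to_neg_one]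
  by_cases hk : 1 ≤ k
  · rw [PySem.List.slice_to _ (by omega : (0 : Int) ≤ k - 1)]
    rw [topSum_spec ((pfx ((a.drop (a.length - N)).reverse)).dropLast).length _ le_rfl (k - 1)]
  · have hnk : n + k ≤ 2 := by omega
    have hmk : (N : Int) + k ≤ 2 := by
      by_cases h : n ≤ 1
      · rw [max_eq_right h] at hnN; omega
      · rw [max_eq_left (by omega)] at hnN; omega
    have hknat : (k - 1 : Int) = -(((1 - k).toNat : Nat) : Int) := by omega
    rw [hknat, PySem.List.slice_to_neg_natCast _ _ (by omega)]
    have hz : (PySem.List.sorted ((pfx ((a.drop (a.length - N)).reverse)).dropLast)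
        (fun x => x) true).length - (1 - k).toNat = 0 := by
      rw [PySem.List.length_sorted, List.length_dropLast, hpfxlen]
      omega
    rw [hz, List.take_zero]
    rw [topSum]
    rw [dif_pos (Or.inl (by omega : -(((1 - k).toNat : Nat) : Int) ≤ 0))]
    simp
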